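-- pv_equiv track=rewrite | github.com/Judongsung/algorithm | 백준/Silver/21921. 블로그/블로그.py | find_max_visit_days
-- ===== SOURCE A (Python) =====
-- def find_max_visit_days(visits: list, days: int) -> tuple:
--     visit = sum(visits[:days])
--     max_visit = visit
--     num = 1
--
--     for i in range(len(visits)-days):
--         visit -= visits[i]
--         visit += visits[i+days]
--         if visit > max_visit:
--             max_visit = visit
--             num = 1
--         elif visit == max_visit:
--             num += 1
--
--     return max_visit, num
-- ===== SOURCE B (Python) =====
-- def find_max_visit_days(visits: list, days: int) -> tuple:
--     n = len(visits)
--     prefix = [0]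
--     s = 0
--     for v in visits:
--         s += v
--         prefix.append(s)
--     max_visit = prefix[min(days, n)]
--     num = 1
--     for i in range(1, n - days + 1):
--         cur = prefix[i + days] - prefix[i]
--         if cur > max_visit:
--             max_visit = cur
--             num = 1
--         elif cur == max_visit:
--             num += 1
--     return max_visit, num
-- ===== Notes on version B (the rewrite author's own statement) =====
-- stated objective: alternative
-- what changed: A maintains a running window sum updated element-by-element; B builds a prefix-sum array once and computes every window sum as a difference of two prefix sums.
import Mathlib
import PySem

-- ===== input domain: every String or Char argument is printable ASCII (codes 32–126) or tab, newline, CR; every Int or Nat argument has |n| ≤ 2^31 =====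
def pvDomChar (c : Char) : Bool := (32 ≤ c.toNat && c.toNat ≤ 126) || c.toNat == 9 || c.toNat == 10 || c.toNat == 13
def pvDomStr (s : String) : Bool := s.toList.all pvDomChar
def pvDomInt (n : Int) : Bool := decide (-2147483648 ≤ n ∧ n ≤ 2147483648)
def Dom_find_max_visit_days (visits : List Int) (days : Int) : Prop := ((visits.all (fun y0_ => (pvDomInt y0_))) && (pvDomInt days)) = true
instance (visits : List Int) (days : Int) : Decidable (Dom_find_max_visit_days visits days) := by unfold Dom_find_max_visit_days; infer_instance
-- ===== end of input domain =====

-- B replaces A's running sliding-window accumulator by a prefix-sum list and computes each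
-- window sum as a difference of two prefix sums (objective: alternative decomposition, same cost).


-- ===== PORT A =====
-- literal port of A: running window sum, updated by subtracting the leaving and adding the entering element
def find_max_visit_days (visits : List Int) (days : Int) : Int × Int :=
  let visit := (PySem.List.slice visits none (some days)).sum
  let st :=
    (PySem.List.pyRange 0 ((visits.length : Int) - days) 1).foldl
      (fun (st : Int × Int × Int) i =>
        let visit := st.1 - PySem.List.pyGetD visits i 0 + PySem.List.pyGetD visits (i + days) 0
        if visit > st.2.1 then (visit, visit, 1)
        else if visit = st.2.1 then (visit, st.2.1, st.2.2 + 1)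
        else (visit, st.2.1, st.2.2))
      (visit, visit, 1)
  (st.2.1, st.2.2)

-- ===== PORT B =====
-- literal port of Source B: build the prefix-sum list, then scan window starts 1 .. n - days
def find_max_visit_days_alt (visits : List Int) (days : Int) : Int × Int :=
  let n : Int := (visits.length : Int)
  let pref := (visits.foldl
      (fun (st : List Int × Int) v => (st.1 ++ [st.2 + v], st.2 + v)) ([0], 0)).1
  let max0 := PySem.List.pyGetD pref (min days n) 0
  (PySem.List.pyRange 1 (n - days + 1) 1).foldl
    (fun (acc : Int × Int) i =>
      let cur := PySem.List.pyGetD pref (i + days) 0 - PySem.List.pyGetD pref i 0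
      if cur > acc.1 then (cur, 1)
      else if cur = acc.1 then (acc.1, acc.2 + 1)
      else acc)
    (max0, 1)

-- ===== PRECONDITION & SPEC =====
-- Pre_ excludes days < 0, on which A always raises an IndexError (its loop then indexes visits past the end).
def Pre_find_max_visit_days (_visits : List Int) (days : Int) : Prop := 0 ≤ days
instance (visits : List Int) (days : Int) : Decidable (Pre_find_max_visit_days visits days) := by unfold Pre_find_max_visit_days; infer_instance
def pvWitness_find_max_visit_days : List Int × Int := ([1, 4, 2, 5, 3], 2)

def Spec_find_max_visit_days (visits : List Int) (days : Int) (out : Int × Int) : Prop := out = find_max_visit_days_alt visits days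
instance (visits : List Int) (days : Int) (out : Int × Int) : Decidable (Spec_find_max_visit_days visits days out) := by unfold Spec_find_max_visit_days; infer_instance

-- ===== CLAIM (what is proved, stated in full; the proofs are below) =====
def Claim_equal_find_max_visit_days : Prop := ∀ (visits : List Int) (days : Int), Dom_find_max_visit_days visits days → Pre_find_max_visit_days visits days → Spec_find_max_visit_days visits days (find_max_visit_days visits days)

-- ===== LEMMAS AND PROOFS =====

-- sum of the window of length d starting at j
def pvW (xs : List Int) (d j : Nat) : Int := ((xs.drop j).take d).sum

-- B's fold builds exactly the list of prefix sums
lemma prefix_build (xs : List Int) : ∀ (acc : List Int) (s : Int),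
    (xs.foldl (fun (st : List Int × Int) v => (st.1 ++ [st.2 + v], st.2 + v)) (acc, s)).1
      = acc ++ (List.range xs.length).map (fun k => s + (xs.take (k + 1)).sum) := by
  induction xs with
  | nil => intro acc s; simp
  | cons x xs ih =>
    intro acc s
    rw [List.foldl_cons, ih]
    simp only [List.length_cons, List.range_succ_eq_map, List.map_cons, List.map_map,
      List.append_assoc, List.take_succ_cons, List.sum_cons, List.take_zero, List.sum_nil]
    have h : (List.range xs.length).map ((fun k => s + (x + (xs.take k).sum)) ∘ Nat.succ)
        = (List.range xs.length).map (fun k => s + x + (xs.take (k + 1)).sum) :=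
      List.map_congr_left (fun a _ => by simp [Function.comp]; ring)
    rw [h]; simp

-- indexing the prefix list gives a prefix sum
lemma prefix_getD (xs : List Int) (k : Nat) (hk : k ≤ xs.length) :
    PySem.List.pyGetD
      ((xs.foldl (fun (st : List Int × Int) v => (st.1 ++ [st.2 + v], st.2 + v)) ([0], 0)).1)
      (k : Int) 0 = (xs.take k).sum := by
  rw [PySem.List.pyGetD_natCast, prefix_build]
  cases k with
  | zero => simp
  | succ j =>
    have hj : j < xs.length := by omega
    simp only [List.singleton_append, List.getD_cons_succ]
    rw [PySem.List.getD_map_range _ _ _ _ hj]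
    ring

-- A's incremental update shifts the window by one
lemma window_shift (xs : List Int) (j d : Nat) (h : j + d < xs.length) :
    pvW xs d j - xs.getD j 0 + xs.getD (j + d) 0 = pvW xs d (j + 1) := by
  have hj : j < xs.length := by omega
  have h1 : ((xs.drop j).take (d + 1)).sum = ((xs.drop j).take d).sum + xs[j + d] := by
    rw [List.take_add_one]
    have : (xs.drop j)[d]? = some xs[j + d] := by
      rw [List.getElem?_drop]
      exact List.getElem?_eq_getElem (by omega)
    rw [this]; simp
  have h2 : (xs.drop j).take (d + 1) = xs[j] :: (xs.drop (j + 1)).take d := by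
    rw [List.drop_eq_getElem_cons hj, List.take_succ_cons]
  rw [List.getD_eq_getElem _ _ hj, List.getD_eq_getElem _ _ h]
  have := h1.symm.trans (congrArg List.sum h2)
  simp only [List.sum_cons] at this
  unfold pvW
  omega

-- B's prefix-sum difference is a window sum
lemma take_sum_diff (xs : List Int) (a d : Nat) :
    (xs.take (a + d)).sum - (xs.take a).sum = pvW xs d a := by
  rw [List.take_add]
  simp [pvW]

-- main correspondence: A's fold (carrying the running window sum) and B's fold over the
-- shifted index range produce the same (max, count) pair, for any common accumulator
lemma loop_eq (xs : List Int) (d : Nat) :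
    ∀ (c j : Nat), j + c + d = xs.length → ∀ (acc : Int × Int),
    ((PySem.List.pyRange (j : Int) ((j : Int) + (c : Int)) 1).foldl
      (fun (st : Int × Int × Int) i =>
        let visit := st.1 - PySem.List.pyGetD xs i 0 + PySem.List.pyGetD xs (i + (d : Int)) 0
        if visit > st.2.1 then (visit, visit, 1)
        else if visit = st.2.1 then (visit, st.2.1, st.2.2 + 1)
        else (visit, st.2.1, st.2.2))
      (pvW xs d j, acc)).2
    = (PySem.List.pyRange ((j : Int) + 1) ((j : Int) + (c : Int) + 1) 1).foldl
        (fun (acc : Int × Int) i =>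
          let cur := PySem.List.pyGetD
              ((xs.foldl (fun (st : List Int × Int) v => (st.1 ++ [st.2 + v], st.2 + v)) ([0], 0)).1)
              (i + (d : Int)) 0
            - PySem.List.pyGetD
              ((xs.foldl (fun (st : List Int × Int) v => (st.1 ++ [st.2 + v], st.2 + v)) ([0], 0)).1)
              i 0
          if cur > acc.1 then (cur, 1)
          else if cur = acc.1 then (acc.1, acc.2 + 1)
          else acc)
        acc := by
  intro c
  induction c with
  | zero =>
    intro j _ acc
    rw [PySem.List.pyRange_one_eq_nil (by omega), PySem.List.pyRange_one_eq_nil (by omega)]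
    rfl
  | succ c ih =>
    intro j hlen acc
    have hcons : PySem.List.pyRange (j : Int) ((j : Int) + (c + 1 : Nat)) 1
        = (j : Int) :: PySem.List.pyRange ((j : Int) + 1) ((j : Int) + (c + 1 : Nat)) 1 :=
      PySem.List.pyRange_one_cons (by push_cast; omega)
    have hcons2 : PySem.List.pyRange ((j : Int) + 1) ((j : Int) + (c + 1 : Nat) + 1) 1
        = ((j : Int) + 1) :: PySem.List.pyRange ((j : Int) + 1 + 1) ((j : Int) + (c + 1 : Nat) + 1) 1 :=
      PySem.List.pyRange_one_cons (by push_cast; omega)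
    rw [hcons, hcons2, List.foldl_cons, List.foldl_cons]
    have hjd : j + d < xs.length := by omega
    have e1 : PySem.List.pyGetD xs (j : Int) 0 = xs.getD j 0 := PySem.List.pyGetD_natCast xs j 0
    have e2 : PySem.List.pyGetD xs ((j : Int) + (d : Int)) 0 = xs.getD (j + d) 0 := by
      rw [show ((j : Int) + (d : Int)) = ((j + d : Nat) : Int) by push_cast; ring,
        PySem.List.pyGetD_natCast]
    have evis : pvW xs d j - PySem.List.pyGetD xs (j : Int) 0
        + PySem.List.pyGetD xs ((j : Int) + (d : Int)) 0 = pvW xs d (j + 1) := by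
      rw [e1, e2]; exact window_shift xs j d hjd
    have e3 : PySem.List.pyGetD
        ((xs.foldl (fun (st : List Int × Int) v => (st.1 ++ [st.2 + v], st.2 + v)) ([0], 0)).1)
        (((j : Int) + 1) + (d : Int)) 0 = (xs.take (j + 1 + d)).sum := by
      rw [show ((j : Int) + 1 + (d : Int)) = ((j + 1 + d : Nat) : Int) by push_cast; ring]
      exact prefix_getD xs (j + 1 + d) (by omega)
    have e4 : PySem.List.pyGetD
        ((xs.foldl (fun (st : List Int × Int) v => (st.1 ++ [st.2 + v], st.2 + v)) ([0], 0)).1)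
        ((j : Int) + 1) 0 = (xs.take (j + 1)).sum := by
      rw [show ((j : Int) + 1) = ((j + 1 : Nat) : Int) by push_cast; ring]
      exact prefix_getD xs (j + 1) (by omega)
    have ecur : PySem.List.pyGetD
        ((xs.foldl (fun (st : List Int × Int) v => (st.1 ++ [st.2 + v], st.2 + v)) ([0], 0)).1)
        (((j : Int) + 1) + (d : Int)) 0
      - PySem.List.pyGetD
        ((xs.foldl (fun (st : List Int × Int) v => (st.1 ++ [st.2 + v], st.2 + v)) ([0], 0)).1)
        ((j : Int) + 1) 0 = pvW xs d (j + 1) := by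
      rw [e3, e4, show j + 1 + d = (j + 1) + d from rfl]
      exact take_sum_diff xs (j + 1) d
    simp only [evis, ecur]
    have hstep : ∀ (v : Int),
        (if v > acc.1 then ((v : Int), v, (1 : Int))
         else if v = acc.1 then (v, acc.1, acc.2 + 1)
         else (v, acc.1, acc.2))
        = (v, if v > acc.1 then ((v : Int), (1 : Int))
              else if v = acc.1 then (acc.1, acc.2 + 1) else acc) := by
      intro v; split_ifs <;> simp
    rw [hstep]
    have ihj := ih (j + 1) (by omega)
        (if pvW xs d (j + 1) > acc.1 then ((pvW xs d (j + 1) : Int), (1 : Int))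
         else if pvW xs d (j + 1) = acc.1 then (acc.1, acc.2 + 1) else acc)
    push_cast at ihj ⊢
    convert ihj using 2 <;> ring_nf

-- the two ports agree whenever days is nonnegative
theorem ports_agree (visits : List Int) (days : Int) (h : 0 ≤ days) :
    find_max_visit_days visits days = find_max_visit_days_alt visits days := by
  obtain ⟨d, rfl⟩ : ∃ d : Nat, days = (d : Int) := ⟨days.toNat, (Int.toNat_of_nonneg h).symm⟩
  simp only [find_max_visit_days, find_max_visit_days_alt]
  have hs := PySem.List.slice_to visits (b := ((d : Nat) : Int)) (by positivity)
  rw [hs]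
  simp only [Int.toNat_natCast]
  by_cases hd : d ≤ visits.length
  · -- days fits: both enumerate 1 + (length - days) windows
    have hinit : (visits.take d).sum = pvW visits d 0 := by simp [pvW]
    have hmin : min ((d : Nat) : Int) ((visits.length : Int)) = ((d : Nat) : Int) := by
      simp; omega
    have hmax0 : PySem.List.pyGetD
        ((visits.foldl (fun (st : List Int × Int) v => (st.1 ++ [st.2 + v], st.2 + v)) ([0], 0)).1)
        (min ((d : Nat) : Int) ((visits.length : Int))) 0 = pvW visits d 0 := by
      rw [hmin, prefix_getD visits d hd, hinit]
    set c : Nat := visits.length - d with hc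
    have h1 : ((visits.length : Int) - (d : Nat)) = ((0 : Int) + (c : Int)) := by omega
    rw [hinit, hmax0, h1]
    have key := loop_eq visits d c 0 (by omega) (pvW visits d 0, 1)
    simp only [Nat.cast_zero] at key
    refine Eq.trans (by rfl) (key.trans ?_)
    norm_num
  · -- days exceeds the length: both loops are empty and the single clipped window is the whole list
    have hnilA : PySem.List.pyRange 0 ((visits.length : Int) - (d : Nat)) 1 = [] :=
      PySem.List.pyRange_one_eq_nil (by omega)
    have hnilB : PySem.List.pyRange 1 ((visits.length : Int) - (d : Nat) + 1) 1 = [] :=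
      PySem.List.pyRange_one_eq_nil (by omega)
    have hmin : min ((d : Nat) : Int) ((visits.length : Int)) = ((visits.length : Nat) : Int) := by
      simp; omega
    rw [hnilA, hnilB, List.foldl_nil, List.foldl_nil, hmin,
      prefix_getD visits visits.length (le_refl _), List.take_of_length_le (by omega),
      List.take_length]

-- ===== VERDICT (by name: the statement is the Claim_ definition above) =====
theorem find_max_visit_days_spec : Claim_equal_find_max_visit_days := by
  intro visits days _ hpre
  exact ports_agree visits days hpre
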